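-- pv_equiv track=rewrite | github.com/TheMathGenius01/Computer_Science_1 | Python/07_iteration/loops_projects/nestedloops_project.py | x_marks_the_spot
-- ===== SOURCE A (Python) =====
-- def x_marks_the_spot(N):
--     """"
--     returns an X with the X's separated by underscores('_'); N will be odd.
--
--     Example below is when N == 9
--
--     X_______X
--     _X_____X_
--     __X___X__
--     ___X_X___
--     ____X____
--     ___X_X___
--     __X___X__
--     _X_____X_
--     X_______X
--     """
--     #todo
--     strn = ""
--     for i in range(N):
--         for j in range(N):
--             if j == i or j == N - 1 - i:
--                 strn += 'X'
--             else:
--                 strn += '_'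
--         strn += '\n'
--     return strn
-- ===== SOURCE B (Python) =====
-- def x_marks_the_spot(N):
--     lines = []
--     for i in range(N):
--         row = ['_'] * N
--         row[i] = 'X'
--         row[N - 1 - i] = 'X'
--         lines.append(''.join(row) + '\n')
--     return ''.join(lines)
-- ===== Notes on version B (the rewrite author's own statement) =====
-- stated objective: faster
-- what changed: The inner per-column loop with a branch on every cell is replaced by building each row as a '_'-filled list and directly assigning the two diagonal cells by index, then joining rows once.
import Mathlib
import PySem

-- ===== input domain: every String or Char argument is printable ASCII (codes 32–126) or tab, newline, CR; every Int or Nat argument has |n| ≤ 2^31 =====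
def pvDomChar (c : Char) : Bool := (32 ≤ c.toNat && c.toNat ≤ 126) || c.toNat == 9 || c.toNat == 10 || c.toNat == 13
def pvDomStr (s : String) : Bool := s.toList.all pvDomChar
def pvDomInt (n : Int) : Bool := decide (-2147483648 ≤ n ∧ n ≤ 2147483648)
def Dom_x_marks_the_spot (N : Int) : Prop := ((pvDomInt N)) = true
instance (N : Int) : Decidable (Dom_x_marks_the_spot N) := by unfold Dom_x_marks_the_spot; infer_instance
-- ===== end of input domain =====

-- B replaces the inner per-column scan by direct index placement of the two 'X' cells in a '_'-filled row (measurably faster, constant-factor).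

-- ===== PORT A =====
-- nested loops over range(N); strings are ported as List Char (PySem.Chars), wrapped in String.ofList at the end
def x_marks_the_spot (N : Int) : String :=
  String.ofList ((PySem.List.pyRange 0 N 1).foldl (fun strn i =>
    ((PySem.List.pyRange 0 N 1).foldl (fun s j =>
      s ++ (if j = i ∨ j = N - 1 - i then ['X'] else ['_'])) strn) ++ ['\n']) [])

-- ===== PORT B =====
-- row = ['_']*N; row[i]='X'; row[N-1-i]='X'; lines.append(''.join(row)+'\n'); return ''.join(lines)
def x_marks_the_spot_alt (N : Int) : String :=
  String.ofList (PySem.Chars.join [] ((PySem.List.pyRange 0 N 1).foldl (fun lines i =>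
    lines ++ [PySem.List.pySetD (PySem.List.pySetD (PySem.List.pyRepeat ['_'] N) i 'X') (N - 1 - i) 'X' ++ ['\n']]) []))

-- ===== PRECONDITION & SPEC =====
def Spec_x_marks_the_spot (N : Int) (out : String) : Prop := out = x_marks_the_spot_alt N
instance (N : Int) (out : String) : Decidable (Spec_x_marks_the_spot N out) := by unfold Spec_x_marks_the_spot; infer_instance

-- ===== CLAIM (what is proved, stated in full; the proofs are below) =====
def Claim_equal_x_marks_the_spot : Prop := ∀ (N : Int), Dom_x_marks_the_spot N → Spec_x_marks_the_spot N (x_marks_the_spot N)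

-- ===== LEMMAS AND PROOFS =====

-- ''.join of a list of chunks is their concatenation
theorem join_nil_eq_flatten (xss : List (List Char)) :
    PySem.Chars.join [] xss = xss.flatten := by
  induction xss with
  | nil => simp [PySem.Chars.join_nil]
  | cons a t ih =>
    cases t with
    | nil => simp [PySem.Chars.join_singleton]
    | cons b t' =>
      rw [PySem.Chars.join_cons_cons, ih]
      simp

-- A's inner loop over one row equals B's directly-built row, for 0 ≤ i < N
theorem row_eq (N i : Int) (h0 : 0 ≤ i) (hN : i < N) :
    (PySem.List.pyRange 0 N 1).flatMap
      (fun j => if j = i ∨ j = N - 1 - i then ['X'] else ['_'])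
    = PySem.List.pySetD (PySem.List.pySetD (PySem.List.pyRepeat ['_'] N) i 'X') (N - 1 - i) 'X' := by
  have hN0 : (0:Int) ≤ N := le_of_lt (lt_of_le_of_lt h0 hN)
  have hmir0 : (0:Int) ≤ N - 1 - i := by omega
  rw [PySem.List.pySetD_of_nonneg _ _ h0, PySem.List.pySetD_of_nonneg _ _ hmir0,
    PySem.List.pyRepeat_singleton, PySem.List.pyRange_one]
  have hflat : ∀ (l : List Int) (g : Int → Char),
      l.flatMap (fun j => [g j]) = l.map g := by
    intro l g; induction l with
    | nil => rfl
    | cons a t ih => simp [List.flatMap_cons, ih]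
  simp only [← apply_ite (fun c : Char => [c])]
  rw [hflat _ (fun j => if j = i ∨ j = N - 1 - i then 'X' else '_')]
  apply List.ext_getElem
  · simp
  · intro k hk1 hk2
    simp only [List.getElem_map, List.getElem_range, List.getElem_set,
      List.getElem_replicate]
    simp only [List.length_map, List.length_range] at hk1
    have hi : i.toNat < N.toNat := by omega
    have hm : (N - 1 - i).toNat < N.toNat := by omega
    by_cases h1 : (0 + (k:Int)) = i
    · have : i.toNat = k := by omega
      simp [h1, this]
    · by_cases h2 : (0 + (k:Int)) = N - 1 - i
      · have hmk : (N - 1 - i).toNat = k := by omega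
        simp [h2, hmk]
      · have hik : ¬ i.toNat = k := by omega
        have hmk : ¬ (N - 1 - i).toNat = k := by omega
        simp only [hik, hmk, if_false]
        rw [if_neg]
        push Not
        omega

-- ===== VERDICT (by name: the statement is the Claim_ definition above) =====
theorem x_marks_the_spot_spec : Claim_equal_x_marks_the_spot := by
  intro N _
  unfold Spec_x_marks_the_spot x_marks_the_spot x_marks_the_spot_alt
  rw [PySem.List.foldl_append_singleton_eq_map, join_nil_eq_flatten, List.nil_append]
  simp only [PySem.List.foldl_append_eq_flatMap]
  rw [show (fun (strn : List Char) (i : Int) =>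
      strn ++ (PySem.List.pyRange 0 N 1).flatMap
        (fun j => if j = i ∨ j = N - 1 - i then ['X'] else ['_']) ++ ['\n'])
    = (fun strn i => strn ++ ((PySem.List.pyRange 0 N 1).flatMap
        (fun j => if j = i ∨ j = N - 1 - i then ['X'] else ['_']) ++ ['\n'])) from by
      funext s i; simp,
    PySem.List.foldl_append_eq_flatMap, List.nil_append]
  congr 1
  rw [List.flatMap_def]
  congr 1
  apply List.map_congr_left
  intro i hi
  rw [PySem.List.mem_pyRange_one] at hi
  rw [row_eq N i hi.1 hi.2]
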